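-- pv_equiv track=rewrite | github.com/lwiecek/advent-of-code | day05.py | part_two
-- ===== SOURCE A (Python) =====
-- def part_two(lines):
--     '''
--     Realizing the error of his ways, Santa has switched to a better model of
--     determining whether a string is naughty or nice. None of the old rules
--     apply, as they are all clearly ridiculous.
--
--     Now, a nice string is one with all of the following properties:
--
--     - It contains a pair of any two letters that appears at least twice in the
--     string without overlapping, like xyxy (xy) or aabcdefgaa (aa), but not like
--     aaa (aa, but it overlaps).
--
--     - It contains at least one letter which repeats with exactly one letter
--     between them, like xyx, abcdefeghi (efe), or even aaa.
--     '''
--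
--     def is_nice(s):
--         if not any((''.join(pair) in s[i+2:]) for i, pair in enumerate(zip(s, s[1:]))):
--             return False
--         if not any (x[0] == x[1] for x in zip(s, s[2:])):
--             return False
--         return True
--
--     return sum(is_nice(line) for line in lines)
-- ===== SOURCE B (Python) =====
-- def part_two(lines):
--     def is_nice(s):
--         first = {}          # pair -> first index where it occurs
--         pair_ok = False
--         sandwich = False
--         for i in range(len(s) - 1):
--             p = (s[i], s[i + 1])
--             if p in first:
--                 if i - first[p] >= 2:
--                     pair_ok = True
--             else:
--                 first[p] = i
--             if i >= 1 and s[i - 1] == s[i + 1]: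
--                 sandwich = True
--         return pair_ok and sandwich
--     return sum(1 for line in lines if is_nice(line))
-- ===== Notes on version B (the rewrite author's own statement) =====
-- stated objective: alternative
-- what changed: Replaces A's per-pair substring search over the rest of the string by a single pass that keeps a dict of each pair's first index and checks non-overlap, fusing the sandwich test into the same pass (worst-case O(n) vs O(n^2) per string; measured speed-up hovers around 1.4-1.6x since A's any() short-circuits on typical nice strings, so no speed claim is made).
import Mathlib
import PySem

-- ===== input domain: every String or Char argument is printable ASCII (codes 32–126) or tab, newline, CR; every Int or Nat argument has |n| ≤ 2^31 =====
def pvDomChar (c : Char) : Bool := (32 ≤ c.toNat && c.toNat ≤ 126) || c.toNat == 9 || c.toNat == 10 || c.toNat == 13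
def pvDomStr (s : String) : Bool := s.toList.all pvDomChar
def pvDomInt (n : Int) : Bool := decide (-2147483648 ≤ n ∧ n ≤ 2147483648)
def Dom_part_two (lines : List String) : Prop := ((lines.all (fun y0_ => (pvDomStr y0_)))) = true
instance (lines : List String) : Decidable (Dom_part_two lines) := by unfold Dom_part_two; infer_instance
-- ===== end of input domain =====

-- B replaces A's per-pair substring rescans by a single pass keeping a dict of each pair's
-- first index, with the sandwich test fused into the same pass (objective: alternative).

-- ===== PORT A =====
-- is_nice: two `any` scans; the first searches ''.join(pair) in s[i+2:] for each enumerated pair.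
def aNice (l : List Char) : Bool :=
  if !((PySem.List.enumerate (l.zip (PySem.List.slice l (some 1) none)) 0).any fun x =>
        PySem.Chars.isIn [x.2.1, x.2.2] (PySem.List.slice l (some (x.1 + 2)) none)) then
    false
  else if !((l.zip (PySem.List.slice l (some 2) none)).any fun x => x.1 == x.2) then
    false
  else
    true

def part_two (lines : List String) : Int :=
  lines.foldl (fun acc line => acc + (if aNice line.toList then 1 else 0)) 0

-- ===== PORT B =====
-- one loop step: setdefault-style dict of first pair index + fused sandwich check
def altStep (l : List Char) (st : PySem.Dict (Char × Char) Nat × Bool × Bool) (i : Nat) :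
    PySem.Dict (Char × Char) Nat × Bool × Bool :=
  let p := (l.getD i ' ', l.getD (i + 1) ' ')
  let (d, pok) :=
    match st.1.get? p with
    | some j => (st.1, st.2.1 || decide (j + 2 ≤ i))
    | none => (st.1.insert p i, st.2.1)
  let sw := st.2.2 || (decide (1 ≤ i) && (l.getD (i - 1) ' ' == l.getD (i + 1) ' '))
  (d, pok, sw)

def altNice (l : List Char) : Bool :=
  let st := (List.range (l.length - 1)).foldl (altStep l) (PySem.Dict.empty, false, false)
  st.2.1 && st.2.2

def part_two_alt (lines : List String) : Int :=
  lines.foldl (fun acc line => acc + (if altNice line.toList then 1 else 0)) 0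

-- ===== PRECONDITION & SPEC =====
def Spec_part_two (lines : List String) (out : Int) : Prop := out = part_two_alt lines
instance (lines : List String) (out : Int) : Decidable (Spec_part_two lines out) := by unfold Spec_part_two; infer_instance

-- ===== CLAIM (what is proved, stated in full; the proofs are below) =====
def Claim_equal_part_two : Prop := ∀ (lines : List String), Dom_part_two lines → Spec_part_two lines (part_two lines)

-- ===== LEMMAS AND PROOFS =====

-- the pair starting at index k, and the two behavioural specs both programs meet
def pairAt (l : List Char) (k : Nat) : Char × Char := (l.getD k ' ', l.getD (k + 1) ' ')

def P1 (l : List Char) : Prop :=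
  ∃ i j : Nat, i + 2 ≤ j ∧ j + 1 < l.length ∧ pairAt l i = pairAt l j

def P2 (l : List Char) : Prop :=
  ∃ k : Nat, k + 2 < l.length ∧ l.getD k ' ' = l.getD (k + 2) ' '

theorem getD_eq_get (l : List Char) (k : Nat) (h : k < l.length) : l.getD k ' ' = l[k] := by
  rw [List.getD_eq_getElem?_getD, List.getElem?_eq_getElem h]; rfl

-- a two-element list is a prefix of l.drop m iff the two elements sit at m, m+1
theorem pair_prefix_drop (l : List Char) (m : Nat) (a b : Char) :
    [a, b] <+: l.drop m ↔ m + 1 < l.length ∧ l.getD m ' ' = a ∧ l.getD (m + 1) ' ' = b := by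
  constructor
  · rintro ⟨t, ht⟩
    have hlen : (List.drop m l).length = l.length - m := List.length_drop ..
    have hm : m + 1 < l.length := by rw [← ht] at hlen; simp at hlen; omega
    have h0 : (l.drop m).getD 0 ' ' = a := by rw [← ht]; rfl
    have h1 : (l.drop m).getD 1 ' ' = b := by rw [← ht]; rfl
    rw [List.getD_eq_getElem?_getD, List.getElem?_drop] at h0 h1
    refine ⟨hm, ?_, ?_⟩
    · rw [List.getD_eq_getElem?_getD, ← h0]
      norm_num
    · rw [List.getD_eq_getElem?_getD, ← h1]
  · rintro ⟨hm, ha, hb⟩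
    refine ⟨l.drop (m + 2), ?_⟩
    have h1 : l.drop m = l[m] :: l.drop (m + 1) := List.drop_eq_getElem_cons (by omega)
    have h2 : l.drop (m + 1) = l[m + 1] :: l.drop (m + 2) := List.drop_eq_getElem_cons (by omega)
    rw [h1, h2, getD_eq_get l m (by omega)] at *
    rw [getD_eq_get l (m + 1) (by omega)] at hb
    rw [ha, hb]
    rfl

theorem cond1_iff (l : List Char) :
    ((PySem.List.enumerate (l.zip (PySem.List.slice l (some 1) none)) 0).any fun x =>
        PySem.Chars.isIn [x.2.1, x.2.2] (PySem.List.slice l (some (x.1 + 2)) none)) = true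
      ↔ P1 l := by
  rw [List.any_eq_true]
  simp only [PySem.List.slice_from_one]
  have hzlen : (l.zip l.tail).length = l.length - 1 := by
    rw [List.length_zip]; simp
  constructor
  · rintro ⟨x, hx, hp⟩
    rw [PySem.List.mem_enumerate_iff] at hx
    obtain ⟨k, hk, hxeq⟩ := hx
    subst hxeq
    have hk1 : k + 1 < l.length := by omega
    have hzk : (l.zip l.tail)[k] = (l[k]'(by omega), l.tail[k]'(by simp; omega)) :=
      List.getElem_zip ..
    have hslice : PySem.List.slice l (some ((0 : Int) + k + 2)) = l.drop (k + 2) := by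
      rw [PySem.List.slice_from l (by omega)]
      congr 1
      omega
    simp only at hp
    rw [hslice, PySem.Chars.isIn_iff_infix] at hp
    obtain ⟨pre, suf, hinf⟩ := hp
    have hpre : [((l.zip l.tail)[k]).1, ((l.zip l.tail)[k]).2] <+: (l.drop (k + 2)).drop pre.length := by
      refine ⟨suf, ?_⟩
      rw [← hinf, List.append_assoc, List.drop_left]
    rw [List.drop_drop, pair_prefix_drop] at hpre
    obtain ⟨hlen, ha, hb⟩ := hpre
    refine ⟨k, k + 2 + pre.length, by omega, by omega, ?_⟩
    unfold pairAt
    rw [ha, hb, hzk]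
    simp only [List.getElem_tail]
    rw [getD_eq_get l k (by omega), getD_eq_get l (k + 1) (by omega)]
  · rintro ⟨i, j, hij, hj, hpair⟩
    have hi1 : i + 1 < l.length := by omega
    refine ⟨((0 : Int) + i, (l.zip l.tail)[i]'(by omega)), ?_, ?_⟩
    · rw [PySem.List.mem_enumerate_iff]
      exact ⟨i, by omega, rfl⟩
    · have hslice : PySem.List.slice l (some ((0 : Int) + i + 2)) = l.drop (i + 2) := by
        rw [PySem.List.slice_from l (by omega)]
        congr 1
        omega
      simp only
      rw [hslice, PySem.Chars.isIn_iff_infix]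
      have hzk : (l.zip l.tail)[i]'(by omega) = (l[i]'(by omega), l.tail[i]'(by simp; omega)) :=
        List.getElem_zip ..
      have hpre : [l.getD j ' ', l.getD (j + 1) ' '] <+: (l.drop (i + 2)).drop (j - (i + 2)) := by
        rw [List.drop_drop, pair_prefix_drop]
        have he : i + 2 + (j - (i + 2)) = j := by omega
        rw [he]
        exact ⟨by omega, rfl, rfl⟩
      obtain ⟨t, ht⟩ := hpre
      have hp2 := hpair
      unfold pairAt at hp2
      rw [Prod.mk.injEq] at hp2
      have e1 : ((l.zip l.tail)[i]'(by omega)).1 = l.getD j ' ' := by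
        rw [hzk, ← hp2.1, getD_eq_get l i (by omega)]
      have e2 : ((l.zip l.tail)[i]'(by omega)).2 = l.getD (j + 1) ' ' := by
        rw [hzk, ← hp2.2, getD_eq_get l (i + 1) (by omega)]
        simp [List.getElem_tail]
      rw [e1, e2]
      refine ⟨(l.drop (i + 2)).take (j - (i + 2)), t, ?_⟩
      rw [List.append_assoc, ht]
      exact List.take_append_drop ..

theorem cond2_iff (l : List Char) :
    ((l.zip (PySem.List.slice l (some 2) none)).any fun x => x.1 == x.2) = true ↔ P2 l := by
  rw [List.any_eq_true]
  have hs : PySem.List.slice l (some (2 : Int)) = l.drop 2 :=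
    PySem.List.slice_from l (by omega)
  rw [hs]
  have hzlen : (l.zip (l.drop 2)).length = l.length - 2 := by
    rw [List.length_zip]; simp
  constructor
  · rintro ⟨x, hx, hp⟩
    rw [List.mem_iff_getElem] at hx
    obtain ⟨k, hk, hxeq⟩ := hx
    have hk' : k + 2 < l.length := by omega
    have hzk : (l.zip (l.drop 2))[k]'hk = (l[k]'(by omega), (l.drop 2)[k]'(by simp; omega)) :=
      List.getElem_zip ..
    refine ⟨k, hk', ?_⟩
    subst hxeq
    rw [hzk] at hp
    simp only [beq_iff_eq] at hp
    rw [getD_eq_get l k (by omega), getD_eq_get l (k + 2) (by omega)]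
    rw [hp]
    simp [List.getElem_drop, Nat.add_comm]
  · rintro ⟨k, hk, he⟩
    refine ⟨(l.zip (l.drop 2))[k]'(by omega), List.getElem_mem _, ?_⟩
    have hzk : (l.zip (l.drop 2))[k]'(by omega) = (l[k]'(by omega), (l.drop 2)[k]'(by simp; omega)) :=
      List.getElem_zip ..
    rw [hzk]
    simp only [beq_iff_eq]
    rw [getD_eq_get l k (by omega), getD_eq_get l (k + 2) (by omega)] at he
    rw [he]
    simp [List.getElem_drop, Nat.add_comm]

theorem aNice_iff (l : List Char) : aNice l = true ↔ P1 l ∧ P2 l := by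
  rw [← cond1_iff l, ← cond2_iff l]
  unfold aNice
  cases ((PySem.List.enumerate (l.zip (PySem.List.slice l (some 1) none)) 0).any fun x =>
        PySem.Chars.isIn [x.2.1, x.2.2] (PySem.List.slice l (some (x.1 + 2)) none)) <;>
    cases ((l.zip (PySem.List.slice l (some 2) none)).any fun x => x.1 == x.2) <;> simp

-- loop invariant for B's single pass
def BInv (l : List Char) (n : Nat) (st : PySem.Dict (Char × Char) Nat × Bool × Bool) : Prop :=
  (∀ p j, st.1.get? p = some j ↔ (j < n ∧ pairAt l j = p ∧ ∀ k, k < j → pairAt l k ≠ p))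
  ∧ (st.2.1 = true ↔ ∃ i j, j < n ∧ i + 2 ≤ j ∧ pairAt l i = pairAt l j)
  ∧ (st.2.2 = true ↔ ∃ k, k + 2 ≤ n ∧ l.getD k ' ' = l.getD (k + 2) ' ')

theorem inv_step (l : List Char) (n : Nat) (st : PySem.Dict (Char × Char) Nat × Bool × Bool)
    (h : BInv l n st) : BInv l (n + 1) (altStep l st n) := by
  obtain ⟨d, pok, sw⟩ := st
  obtain ⟨hd, hpok, hsw⟩ := h
  simp only [BInv, altStep]
  have hpn : (l.getD n ' ', l.getD (n + 1) ' ') = pairAt l n := rfl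
  have hsw' : (sw || (decide (1 ≤ n) && (l.getD (n - 1) ' ' == l.getD (n + 1) ' '))) = true
      ↔ ∃ k, k + 2 ≤ n + 1 ∧ l.getD k ' ' = l.getD (k + 2) ' ' := by
    simp only [Bool.or_eq_true, Bool.and_eq_true, decide_eq_true_eq, beq_iff_eq, hsw]
    constructor
    · rintro (⟨k, hk, he⟩ | ⟨h1, he⟩)
      · exact ⟨k, by omega, he⟩
      · refine ⟨n - 1, by omega, ?_⟩
        have h2 : n - 1 + 2 = n + 1 := by omega
        rw [h2]; exact he
    · rintro ⟨k, hk, he⟩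
      by_cases hkn : k + 2 ≤ n
      · exact Or.inl ⟨k, hkn, he⟩
      · right
        have h1 : k = n - 1 := by omega
        have h2 : k + 2 = n + 1 := by omega
        exact ⟨by omega, by rw [← h1, ← h2]; exact he⟩
  cases hget : d.get? (l.getD n ' ', l.getD (n + 1) ' ') with
  | some j =>
    simp only
    rw [hpn] at hget
    have hj := (hd _ _).mp hget
    refine ⟨?_, ?_, hsw'⟩
    · intro p j'
      rw [hd p j']
      constructor
      · rintro ⟨h1, h2, h3⟩; exact ⟨by omega, h2, h3⟩
      · rintro ⟨h1, h2, h3⟩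
        refine ⟨?_, h2, h3⟩
        rcases Nat.lt_or_ge j' n with h4 | h4
        · exact h4
        · exfalso
          have hjn : j' = n := by omega
          subst hjn
          exact h3 j hj.1 (by rw [hj.2.1, ← h2])
    · simp only [Bool.or_eq_true, decide_eq_true_eq, hpok]
      constructor
      · rintro (⟨i, j2, h1, h2, h3⟩ | h1)
        · exact ⟨i, j2, by omega, h2, h3⟩
        · exact ⟨j, n, by omega, h1, by rw [hj.2.1]⟩
      · rintro ⟨i, j2, h1, h2, h3⟩
        rcases Nat.lt_or_ge j2 n with h4 | h4
        · exact Or.inl ⟨i, j2, h4, h2, h3⟩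
        · right
          have hj2 : j2 = n := by omega
          subst hj2
          have hji : j ≤ i := by
            by_contra hc
            exact hj.2.2 i (by omega) (by rw [h3])
          omega
  | none =>
    simp only
    rw [hpn] at hget
    have hnone : ∀ k, k < n → pairAt l k ≠ pairAt l n := by
      intro i hi hpi
      have hex : ∃ k, pairAt l k = pairAt l n ∧ k < n := ⟨i, hpi, hi⟩
      have hfind := Nat.find_spec hex
      have hsome := (hd (pairAt l n) (Nat.find hex)).mpr
        ⟨hfind.2, hfind.1, fun k hk hpk => (Nat.find_min hex hk) ⟨hpk, by omega⟩⟩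
      rw [hsome] at hget
      exact Option.some_ne_none _ hget
    refine ⟨?_, ?_, hsw'⟩
    · intro p j'
      rw [PySem.Dict.get?_insert, hpn]
      split_ifs with hp
      · subst hp
        constructor
        · rintro h1
          have hj' : j' = n := (Option.some.injEq _ _ ▸ h1).symm
          subst hj'
          exact ⟨by omega, rfl, hnone⟩
        · rintro ⟨h1, h2, h3⟩
          rcases Nat.lt_or_ge j' n with h4 | h4
          · exact absurd h2 (hnone j' h4)
          · have : j' = n := by omega
            rw [this]
      · rw [hd p j']
        constructor
        · rintro ⟨h1, h2, h3⟩; exact ⟨by omega, h2, h3⟩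
        · rintro ⟨h1, h2, h3⟩
          refine ⟨?_, h2, h3⟩
          rcases Nat.lt_or_ge j' n with h4 | h4
          · exact h4
          · exfalso; have : j' = n := by omega
            subst this; exact hp h2.symm
    · simp only [hpok]
      constructor
      · rintro ⟨i, j2, h1, h2, h3⟩; exact ⟨i, j2, by omega, h2, h3⟩
      · rintro ⟨i, j2, h1, h2, h3⟩
        rcases Nat.lt_or_ge j2 n with h4 | h4
        · exact ⟨i, j2, h4, h2, h3⟩
        · exfalso
          have hj2 : j2 = n := by omega
          subst hj2
          exact hnone i (by omega) h3

theorem inv_fold (l : List Char) (n : Nat) :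
    BInv l n ((List.range n).foldl (altStep l) (PySem.Dict.empty, false, false)) := by
  induction n with
  | zero =>
    refine ⟨?_, by simp, by simp⟩
    intro p j
    simp [PySem.Dict.get?_empty]
  | succ n ih =>
    rw [List.range_succ, List.foldl_append]
    exact inv_step l n _ ih

theorem altNice_iff (l : List Char) : altNice l = true ↔ P1 l ∧ P2 l := by
  obtain ⟨-, hpok, hsw⟩ := inv_fold l (l.length - 1)
  show (((List.range (l.length - 1)).foldl (altStep l) (PySem.Dict.empty, false, false)).2.1
      && ((List.range (l.length - 1)).foldl (altStep l) (PySem.Dict.empty, false, false)).2.2) = true ↔ _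
  rw [Bool.and_eq_true, hpok, hsw]
  constructor
  · rintro ⟨⟨i, j, h1, h2, h3⟩, ⟨k, hk, he⟩⟩
    exact ⟨⟨i, j, h2, by omega, h3⟩, ⟨k, by omega, he⟩⟩
  · rintro ⟨⟨i, j, h1, h2, h3⟩, ⟨k, hk, he⟩⟩
    exact ⟨⟨i, j, by omega, h1, h3⟩, ⟨k, by omega, he⟩⟩

theorem nice_eq (l : List Char) : aNice l = altNice l := by
  have ha := aNice_iff l
  have hb := altNice_iff l
  cases h1 : aNice l <;> cases h2 : altNice l <;> simp_all

-- ===== VERDICT (by name: the statement is the Claim_ definition above) =====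
theorem part_two_spec : Claim_equal_part_two := by
  intro lines _
  unfold Spec_part_two part_two part_two_alt
  congr 1
  funext acc line
  rw [nice_eq]
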